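-- pv_equiv track=rewrite | github.com/gokeshenzhen/take-root | src/take_root/runtimes/fake.py | _fill_placeholders
-- ===== SOURCE A (Python) =====
-- def _fill_placeholders(content: str, boot_message: str) -> str:
--     replacements = {
--         "{{round}}": _sniff_field(boot_message, "round") or "1",
--         "{{iteration}}": _sniff_field(boot_message, "iteration") or "1",
--     }
--     for placeholder, value in replacements.items():
--         content = content.replace(placeholder, value)
--     return content
--
-- def _sniff_field(boot_message: str, key: str) -> str | None:
--     prefix = f"{key}:"
--     for line in boot_message.splitlines():
--         stripped = line.strip()
--         if stripped.startswith(prefix):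
--             return stripped.split(":", 1)[1].strip()
--     return None
-- ===== SOURCE B (Python) =====
-- def _fill_placeholders(content: str, boot_message: str) -> str:
--     table = {}
--     for line in boot_message.splitlines():
--         parts = line.strip().split(":", 1)
--         if len(parts) == 2:
--             table.setdefault(parts[0], parts[1].strip())
--     round_value = table.get("round") or "1"
--     iteration_value = table.get("iteration") or "1"
--     return content.replace("{{round}}", round_value).replace("{{iteration}}", iteration_value)
-- ===== Notes on version B (the rewrite author's own statement) =====
-- stated objective: alternative
-- what changed: B scans the boot message once, building a first-occurrence key->value table from each line's 'key: value' split, then looks up 'round' and 'iteration', instead of A's separate full _sniff_field scan per placeholder.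
import Mathlib
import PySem

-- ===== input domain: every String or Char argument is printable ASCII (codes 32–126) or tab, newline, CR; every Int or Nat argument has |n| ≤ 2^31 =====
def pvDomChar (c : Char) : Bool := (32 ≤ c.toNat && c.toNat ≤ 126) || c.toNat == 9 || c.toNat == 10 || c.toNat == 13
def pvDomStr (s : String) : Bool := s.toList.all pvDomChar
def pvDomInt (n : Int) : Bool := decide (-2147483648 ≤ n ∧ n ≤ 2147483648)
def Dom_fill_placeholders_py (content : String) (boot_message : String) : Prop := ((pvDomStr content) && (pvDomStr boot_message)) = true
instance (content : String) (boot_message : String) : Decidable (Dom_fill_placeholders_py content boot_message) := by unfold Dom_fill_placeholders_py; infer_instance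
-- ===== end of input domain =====

-- B replaces A's two full scans of the boot message (one per key, via _sniff_field) by ONE scan that
-- builds a first-occurrence field table, then looks both keys up; objective: alternative decomposition.

-- ===== PORT A =====
-- the 'for line in boot_message.splitlines()' loop of _sniff_field
def pv_sniff_go (lines : List String) (pre : String) : Option String :=
  match lines with
  | [] => none
  | line :: rest =>
    let stripped := PySem.Str.strip line
    if PySem.Str.startswith stripped pre then
      -- stripped.split(":", 1)[1].strip(); index 1 is in range whenever this branch is taken
      some (PySem.Str.strip ((PySem.List.pyGet? ((PySem.Str.splitMax? stripped ":" 1).getD []) 1).getD ""))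
    else pv_sniff_go rest pre

def pv_sniff_field (boot_message : String) (key : String) : Option String :=
  pv_sniff_go (PySem.Str.splitlines boot_message) (key ++ ":")

def fill_placeholders_py (content : String) (boot_message : String) : String :=
  -- _sniff_field(boot_message, key) or "1"  (an empty-string result is falsy)
  let round_v := match pv_sniff_field boot_message "round" with
    | some v => if v = "" then "1" else v
    | none => "1"
  let iteration_v := match pv_sniff_field boot_message "iteration" with
    | some v => if v = "" then "1" else v
    | none => "1"
  -- for placeholder, value in replacements.items(): content = content.replace(placeholder, value)
  [("{{round}}", round_v), ("{{iteration}}", iteration_v)].foldl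
    (fun c p => PySem.Str.replace c p.1 p.2) content

-- ===== PORT B =====
-- loop body of B's single pass: parts = line.strip().split(":", 1); if len == 2, setdefault
def pv_table_step (d : PySem.Dict String String) (line : String) : PySem.Dict String String :=
  let parts := (PySem.Str.splitMax? (PySem.Str.strip line) ":" 1).getD []
  if parts.length = 2 then
    d.setdefault ((PySem.List.pyGet? parts 0).getD "")
      (PySem.Str.strip ((PySem.List.pyGet? parts 1).getD ""))
  else d

def fill_placeholders_py_alt (content : String) (boot_message : String) : String :=
  let table := (PySem.Str.splitlines boot_message).foldl pv_table_step PySem.Dict.empty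
  -- table.get(key) or "1"
  let round_v := match table.get? "round" with
    | some v => if v = "" then "1" else v
    | none => "1"
  let iteration_v := match table.get? "iteration" with
    | some v => if v = "" then "1" else v
    | none => "1"
  PySem.Str.replace (PySem.Str.replace content "{{round}}" round_v) "{{iteration}}" iteration_v

-- ===== PRECONDITION & SPEC =====
def Spec_fill_placeholders_py (content : String) (boot_message : String) (out : String) : Prop := out = fill_placeholders_py_alt content boot_message
instance (content : String) (boot_message : String) (out : String) : Decidable (Spec_fill_placeholders_py content boot_message out) := by unfold Spec_fill_placeholders_py; infer_instance

-- ===== CLAIM (what is proved, stated in full; the proofs are below) =====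
def Claim_equal_fill_placeholders_py : Prop := ∀ (content : String) (boot_message : String), Dom_fill_placeholders_py content boot_message → Spec_fill_placeholders_py content boot_message (fill_placeholders_py content boot_message)

-- ===== LEMMAS AND PROOFS =====

-- splitOnMax.go with 0 splits left returns the rest as one final piece
lemma pv_go0 (fuel : Nat) (l cur : List Char) (acc : List (List Char)) :
    PySem.Chars.splitOnMax.go [':'] fuel 0 l cur acc = acc.reverse ++ [cur.reverse ++ l] := by
  cases fuel with
  | zero => simp [PySem.Chars.splitOnMax.go]
  | succ n => cases l with
    | nil => simp [PySem.Chars.splitOnMax.go]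
    | cons c rest => simp [PySem.Chars.splitOnMax.go]

-- splitOnMax.go with 1 split left cuts at the first ':' (if any)
lemma pv_go1 (fuel : Nat) (l cur : List Char) (acc : List (List Char)) (h : l.length ≤ fuel) :
    PySem.Chars.splitOnMax.go [':'] fuel 1 l cur acc =
      if ':' ∈ l then
        acc.reverse ++ [cur.reverse ++ l.takeWhile (· != ':'), (l.dropWhile (· != ':')).tail]
      else acc.reverse ++ [cur.reverse ++ l] := by
  induction fuel generalizing l cur acc with
  | zero =>
    have : l = [] := List.length_eq_zero_iff.mp (Nat.le_zero.mp h)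
    subst this; simp [PySem.Chars.splitOnMax.go]
  | succ n ih =>
    cases l with
    | nil => simp [PySem.Chars.splitOnMax.go]
    | cons c rest =>
      by_cases hc : c = ':'
      · subst hc
        simp [PySem.Chars.splitOnMax.go, List.isPrefixOf, pv_go0]
      · have hpre : List.isPrefixOf [':'] (c :: rest) = false := by
          simp [List.isPrefixOf]; exact fun h => absurd h.symm hc
        rw [PySem.Chars.splitOnMax.go]
        simp only [hpre, if_neg (by omega : ¬ (1:Nat) = 0)]
        rw [ih rest (c :: cur) acc (by simpa using Nat.lt_succ_iff.mp (by simpa using h))]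
        by_cases hm : ':' ∈ rest <;> simp [hm, hc, Ne.symm hc]

-- s.split(":", 1) characterised by the first ':' of s
lemma pv_parts_char (s : String) :
    (PySem.Str.splitMax? s ":" 1).getD [] =
      if ':' ∈ s.toList then
        [String.ofList (s.toList.takeWhile (· != ':')),
         String.ofList ((s.toList.dropWhile (· != ':')).tail)]
      else [s] := by
  have hsep : (":" : String).toList = [':'] := by decide
  simp only [PySem.Str.splitMax?, hsep, PySem.Chars.splitMax?, List.isEmpty_cons,
    PySem.Chars.splitOnMax, if_neg (by omega : ¬ (1:Int) < 0)]
  rw [show ((1:Int).toNat) = 1 from rfl]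
  rw [pv_go1 (s.toList.length + 1) s.toList [] [] (by omega)]
  by_cases hm : ':' ∈ s.toList <;> simp [hm, Option.getD, String.ofList_toList]

-- (key ++ ":") is a prefix of s iff s has a ':' and the part before the first ':' is key
lemma pv_prefix_iff (s k : List Char) (hk : ':' ∉ k) :
    (k ++ [':']) <+: s ↔ (':' ∈ s ∧ s.takeWhile (· != ':') = k) := by
  constructor
  · rintro ⟨t, ht⟩
    subst ht
    have hall : ∀ c ∈ k, (c != ':') = true := by
      intro c hc; simp only [bne_iff_ne, ne_eq]; rintro rfl; exact hk hc
    constructor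
    · simp
    · rw [List.append_assoc, List.takeWhile_append_of_pos hall]
      simp
  · rintro ⟨hm, htw⟩
    have hne : s.dropWhile (· != ':') ≠ [] := by
      intro h0
      have := List.takeWhile_append_dropWhile (p := (· != ':')) (l := s)
      rw [h0, List.append_nil, htw] at this
      exact hk (this ▸ hm)
    have hhead : ((s.dropWhile (· != ':')).head hne) = ':' := by
      have := List.head_dropWhile_not (· != ':') hne
      simpa using this
    refine ⟨(s.dropWhile (· != ':')).tail, ?_⟩
    conv_rhs => rw [← List.takeWhile_append_dropWhile (p := (· != ':')) (l := s)]
    rw [htw, ← List.cons_head_tail hne, hhead]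
    simp

-- the single-pass table agrees with A's first-match scan
lemma pv_table_inv (lines : List String) (d : PySem.Dict String String) (key : String)
    (hk : ':' ∉ key.toList) :
    (lines.foldl pv_table_step d).get? key =
      match d.get? key with
      | some v => some v
      | none => pv_sniff_go lines (key ++ ":") := by
  induction lines generalizing d with
  | nil => cases hd : d.get? key <;> simp [pv_sniff_go, hd]
  | cons l rest ih =>
    simp only [List.foldl_cons, pv_sniff_go]
    set s := PySem.Str.strip l with hs
    have hsw : PySem.Str.startswith s (key ++ ":") =
        decide (':' ∈ s.toList ∧ s.toList.takeWhile (· != ':') = key.toList) := by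
      have hiff : PySem.Str.startswith s (key ++ ":") = true ↔
          (':' ∈ s.toList ∧ s.toList.takeWhile (· != ':') = key.toList) := by
        rw [PySem.Str.startswith_eq, PySem.Chars.startswith_iff, String.toList_append,
          show (":" : String).toList = [':'] from by decide, pv_prefix_iff _ _ hk]
      by_cases hP : (':' ∈ s.toList ∧ s.toList.takeWhile (· != ':') = key.toList)
      · have h1 := hiff.mpr hP; simp only [hP]; exact h1
      · simp only [hP, decide_false]
        exact Bool.eq_false_iff.mpr (fun h => hP (hiff.mp h))
    by_cases hm : ':' ∈ s.toList
    · -- the line has a colon: parts has length 2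
      have hparts : (PySem.Str.splitMax? s ":" 1).getD [] =
          [String.ofList (s.toList.takeWhile (· != ':')),
           String.ofList ((s.toList.dropWhile (· != ':')).tail)] := by
        rw [pv_parts_char]; simp [hm]
      have hstep : pv_table_step d l =
          d.setdefault (String.ofList (s.toList.takeWhile (· != ':')))
            (PySem.Str.strip (String.ofList ((s.toList.dropWhile (· != ':')).tail))) := by
        simp [pv_table_step, ← hs, hparts, PySem.List.pyGet?, PySem.List.pyIdx?]
      by_cases hkey : String.ofList (s.toList.takeWhile (· != ':')) = key
      · -- this line's key IS the sniffed key: A stops here, B's setdefault keeps the first value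
        have htw : s.toList.takeWhile (· != ':') = key.toList := by
          rw [← hkey]; simp
        rw [hsw]; simp only [hm, htw, decide_true, and_self, if_true]
        cases hd : d.get? key with
        | some v =>
          have hcon : d.contains key = true := by
            rw [PySem.Dict.contains_eq_isSome_get?, hd]; rfl
          rw [hstep, hkey, PySem.Dict.setdefault_of_contains _ _ hcon, ih d, hd]
        | none =>
          have hcon : d.contains key = false := by
            rw [PySem.Dict.contains_eq_isSome_get?, hd]; rfl
          rw [hstep, hkey, PySem.Dict.setdefault_of_not_contains _ _ hcon, ih _]
          rw [PySem.Dict.get?_insert_self, hparts]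
          simp [PySem.List.pyGet?, PySem.List.pyIdx?]
      · -- a different key: the setdefault does not affect the lookup
        rw [hsw]
        have : ¬ (':' ∈ s.toList ∧ s.toList.takeWhile (· != ':') = key.toList) := by
          rintro ⟨-, h2⟩
          exact hkey (by rw [h2, String.ofList_toList])
        simp only [this, decide_false]
        rw [hstep, ih _, PySem.Dict.get?_setdefault_of_ne _ _ (Ne.symm hkey)]
        simp
    · -- no colon in the line: parts has length 1, A's startswith is false
      have hstep : pv_table_step d l = d := by
        have : (PySem.Str.splitMax? s ":" 1).getD [] = [s] := by
          rw [pv_parts_char]; simp [hm]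
        simp [pv_table_step, ← hs, this]
      rw [hsw]
      simp only [hm, false_and, decide_false]
      rw [hstep, ih d]
      simp

-- ===== VERDICT (by name: the statement is the Claim_ definition above) =====
theorem fill_placeholders_py_spec : Claim_equal_fill_placeholders_py := by
  intro content boot_message _
  unfold Spec_fill_placeholders_py fill_placeholders_py fill_placeholders_py_alt pv_sniff_field
  have hr := pv_table_inv (PySem.Str.splitlines boot_message) PySem.Dict.empty "round" (by decide)
  have hi := pv_table_inv (PySem.Str.splitlines boot_message) PySem.Dict.empty "iteration" (by decide)
  rw [PySem.Dict.get?_empty] at hr hi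
  simp only [hr, hi, List.foldl_cons, List.foldl_nil]
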